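/- GENERATED by c/gen_decode.py: decode facts of the image, one per distinct instruction byte string. -/
import UserX.DecodeImage

#decode_all Toyh.Dec
  "488b05efc80300"  -- mov rax,QWORD PTR [rip+0x3c8ef]
  "e8bf000000"  -- call 1050e0
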